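-- pv_equiv track=rewrite | github.com/emmalobley/advent-of-code-2024 | Day2/RedNosed.py | safeIncrease
-- ===== SOURCE A (Python) =====
-- def safeIncrease(report):
--     for i in range(len(report)-1):
--         if int(report[i]) > int(report[i+1]):
--             return 0
--         elif int(report[i]) < int(report[i+1]) - 3:
--             return 0
--         elif int(report[i]) == int(report[i + 1]):
--             return 0
--     return 1
-- ===== SOURCE B (Python) =====
-- def safeIncrease(report):
--     diffs = [int(report[i + 1]) - int(report[i]) for i in range(len(report) - 1)]
--     if not diffs:
--         return 1
--     return 1 if min(diffs) >= 1 and max(diffs) <= 3 else 0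
-- ===== Notes on version B (the rewrite author's own statement) =====
-- stated objective: alternative
-- what changed: Instead of A's per-pair three-branch early-return index loop, B first materialises the full list of consecutive differences and then decides with two whole-list aggregations (min and max) against the 1..3 window.
-- outside the precondition, e.g. on safeIncrease(['5', '1', 'x']): A returns 0, B raises ValueError
import Mathlib
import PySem

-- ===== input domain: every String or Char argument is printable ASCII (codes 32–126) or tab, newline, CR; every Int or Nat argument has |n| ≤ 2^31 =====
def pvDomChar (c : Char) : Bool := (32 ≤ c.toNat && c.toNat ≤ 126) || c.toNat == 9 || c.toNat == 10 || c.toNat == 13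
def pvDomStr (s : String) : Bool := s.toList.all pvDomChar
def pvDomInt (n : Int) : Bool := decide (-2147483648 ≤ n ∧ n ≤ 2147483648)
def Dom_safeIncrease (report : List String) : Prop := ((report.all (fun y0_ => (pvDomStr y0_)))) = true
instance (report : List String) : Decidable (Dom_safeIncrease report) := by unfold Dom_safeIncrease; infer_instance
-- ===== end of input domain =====

-- B replaces A's per-pair three-branch early-return scan with a build-then-aggregate shape: it first
-- materialises the whole list of consecutive differences, then decides by min/max aggregation; objective: alternative.

-- ===== PORT A =====
-- int(report[i]): indexing is always in range inside the loop; parsing via ofStr?.getD 0 is exact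
-- on Pre_ (every entry parses, or the list is too short to parse anything)
def pvVal (report : List String) (i : Int) : Int :=
  (PySem.Int.ofStr? (PySem.List.pyGetD report i "")).getD 0

def safeIncreaseLoop (report : List String) : List Int → Int
  | [] => 1
  | i :: rest =>
    if pvVal report i > pvVal report (i + 1) then 0
    else if pvVal report i < pvVal report (i + 1) - 3 then 0
    else if pvVal report i = pvVal report (i + 1) then 0
    else safeIncreaseLoop report rest

def safeIncrease (report : List String) : Int :=
  safeIncreaseLoop report (PySem.List.pyRange 0 ((report.length : Int) - 1) 1)

-- ===== PORT B =====
-- int(s): exact on Pre_ (every entry parses, or the range — and hence the comprehension — is empty);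
-- min/max are only taken when diffs is nonempty, where Python's min/max return (no ValueError)
def pvParse (s : String) : Int := (PySem.Int.ofStr? s).getD 0

def pvDiffs (report : List String) : List Int :=
  (PySem.List.pyRange 0 ((report.length : Int) - 1) 1).map
      (fun i => pvParse (PySem.List.pyGetD report (i + 1) "") - pvParse (PySem.List.pyGetD report i ""))

def safeIncrease_alt (report : List String) : Int :=
  if pvDiffs report = [] then 1
  else if 1 ≤ (PySem.List.min? (pvDiffs report) (fun x => x)).getD 0 ∧ (PySem.List.max? (pvDiffs report) (fun x => x)).getD 0 ≤ 3
    then 1 else 0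

-- ===== PRECONDITION & SPEC =====
-- Pre_ excludes reports of length ≥ 2 containing a non-integer entry: there B parses every entry up
-- front and raises ValueError, while A's early-return scan can still return 0 when an adjacent pair
-- before the junk already fails (and raises ValueError itself otherwise).
def Pre_safeIncrease (report : List String) : Prop :=
  report.length ≤ 1 ∨ ∀ s ∈ report, (PySem.Int.ofStr? s).isSome = true
instance (report : List String) : Decidable (Pre_safeIncrease report) := by unfold Pre_safeIncrease; infer_instance
def pvWitness_safeIncrease : List String := ["1", "3", "6"]
def Spec_safeIncrease (report : List String) (out : Int) : Prop := out = safeIncrease_alt report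
instance (report : List String) (out : Int) : Decidable (Spec_safeIncrease report out) := by unfold Spec_safeIncrease; infer_instance

-- ===== CLAIM (what is proved, stated in full; the proofs are below) =====
def Claim_equal_safeIncrease : Prop := ∀ (report : List String), Dom_safeIncrease report → Pre_safeIncrease report → Spec_safeIncrease report (safeIncrease report)

-- ===== LEMMAS AND PROOFS =====

-- common recursive characterisation of A's scan over the parsed values
def pvChk : List Int → Int
  | [] => 1
  | [_] => 1
  | a :: b :: rest =>
    if a > b ∨ a < b - 3 ∨ a = b then 0 else pvChk (b :: rest)

lemma pvChk_short (l : List Int) (h : l.length ≤ 1) : pvChk l = 1 := by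
  match l, h with
  | [], _ => rfl
  | [_], _ => rfl

set_option maxHeartbeats 1000000 in
lemma loopA_eq (report : List String) (k : Nat) :
    safeIncreaseLoop report (PySem.List.pyRange (k : Int) ((report.length : Int) - 1) 1)
      = pvChk ((report.drop k).map (fun s => (PySem.Int.ofStr? s).getD 0)) := by
  have main : ∀ (m k : Nat), report.length - k ≤ m →
      safeIncreaseLoop report (PySem.List.pyRange (k : Int) ((report.length : Int) - 1) 1)
        = pvChk ((report.drop k).map (fun s => (PySem.Int.ofStr? s).getD 0)) := by
    intro m
    induction m with
    | zero =>
      intro k hk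
      have hlen : report.length ≤ k := by omega
      rw [PySem.List.pyRange_one_eq_nil (by omega : (report.length : Int) - 1 ≤ (k : Int))]
      rw [pvChk_short _ (by simp; omega)]
      rfl
    | succ m ih =>
      intro k hk
      by_cases h : (k : Int) < (report.length : Int) - 1
      · have hk1 : k + 1 < report.length := by omega
        have hk0 : k < report.length := by omega
        rw [PySem.List.pyRange_one_cons h]
        rw [safeIncreaseLoop]
        have hv0 : pvVal report (k : Int) = (PySem.Int.ofStr? report[k]).getD 0 := by
          unfold pvVal
          rw [PySem.List.pyGetD_natCast, List.getD_eq_getElem?_getD,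
              List.getElem?_eq_getElem hk0]
          rfl
        have hv1 : pvVal report ((k : Int) + 1) = (PySem.Int.ofStr? report[k+1]).getD 0 := by
          have hc : (k : Int) + 1 = ((k + 1 : Nat) : Int) := by push_cast; ring
          unfold pvVal
          rw [hc, PySem.List.pyGetD_natCast, List.getD_eq_getElem?_getD,
              List.getElem?_eq_getElem hk1]
          rfl
        have hdrop : report.drop k = report[k] :: report.drop (k + 1) :=
          List.drop_eq_getElem_cons hk0
        have hdrop1 : report.drop (k + 1) = report[k+1] :: report.drop (k + 2) :=
          List.drop_eq_getElem_cons hk1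
        rw [hdrop, hdrop1, List.map_cons, List.map_cons]
        simp only [pvChk]
        rw [hv0, hv1]
        set a := (PySem.Int.ofStr? report[k]).getD 0
        set b := (PySem.Int.ofStr? report[k+1]).getD 0
        by_cases h1 : a > b
        · rw [if_pos h1, if_pos (Or.inl h1)]
        · rw [if_neg h1]
          by_cases h2 : a < b - 3
          · rw [if_pos h2, if_pos (Or.inr (Or.inl h2))]
          · rw [if_neg h2]
            by_cases h3 : a = b
            · rw [if_pos h3, if_pos (Or.inr (Or.inr h3))]
            · rw [if_neg h3, if_neg (not_or.mpr ⟨h1, not_or.mpr ⟨h2, h3⟩⟩)]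
              have : ((k : Int) + 1) = ((k + 1 : Nat) : Int) := by push_cast; ring
              rw [this, ih (k + 1) (by omega), hdrop1, List.map_cons]
      · rw [PySem.List.pyRange_one_eq_nil (by omega),
            pvChk_short _ (by simp; omega)]
        rfl
  exact main (report.length - k) k le_rfl

-- the comprehension of B is the list of consecutive differences of the parsed values
lemma diffs_eq (report : List String) :
    pvDiffs report
      = ((report.map pvParse).zip (report.map pvParse).tail).map (fun p => p.2 - p.1) := by
  unfold pvDiffs
  set vals := report.map pvParse with hvals
  apply List.ext_getElem
  · simp [PySem.List.length_pyRange_one, hvals, List.length_zip]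
  · intro j h1 h2
    have hlen : (PySem.List.pyRange 0 ((report.length : Int) - 1) 1).length = report.length - 1 := by
      simp [PySem.List.length_pyRange_one]
    have hj : j < report.length - 1 := by rw [List.length_map, hlen] at h1; omega
    have hj0 : j < report.length := by omega
    have hj1 : j + 1 < report.length := by omega
    have hget : (PySem.List.pyRange 0 ((report.length : Int) - 1) 1)[j]'(by rw [hlen]; omega) = (j : Int) := by
      rw [PySem.List.getElem_pyRange_one]; ring
    rw [List.getElem_map, List.getElem_map, hget]
    have hz : (vals.zip vals.tail)[j]'(by
        simp [List.length_zip, hvals]; omega) = (vals[j]'(by simp [hvals]; omega),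
          vals.tail[j]'(by simp [hvals]; omega)) := List.getElem_zip
    rw [hz]
    have ht : vals.tail[j]'(by simp [hvals]; omega) = vals[j+1]'(by simp [hvals]; omega) := by
      simp [List.getElem_tail]
    rw [ht]
    have e0 : pvParse (PySem.List.pyGetD report (j : Int) "") = vals[j]'(by simp [hvals]; omega) := by
      rw [PySem.List.pyGetD_natCast, List.getD_eq_getElem?_getD, List.getElem?_eq_getElem hj0]
      simp [hvals]
    have e1 : pvParse (PySem.List.pyGetD report ((j : Int) + 1) "") = vals[j+1]'(by simp [hvals]; omega) := by
      have hc : (j : Int) + 1 = ((j + 1 : Nat) : Int) := by push_cast; ring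
      rw [hc, PySem.List.pyGetD_natCast, List.getD_eq_getElem?_getD, List.getElem?_eq_getElem hj1]
      simp [hvals]
    rw [e0, e1]

-- the min/max aggregation on a nonempty diff list decides exactly the all-pairs 1..3 window
lemma minmax_eq_all (ds : List Int) (h : ds ≠ []) :
    ((if 1 ≤ (PySem.List.min? ds (fun x => x)).getD 0 ∧ (PySem.List.max? ds (fun x => x)).getD 0 ≤ 3
      then (1 : Int) else 0))
      = (if ∀ d ∈ ds, 1 ≤ d ∧ d ≤ 3 then (1 : Int) else 0) := by
  obtain ⟨a, t, rfl⟩ : ∃ a t, ds = a :: t := by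
    cases ds with
    | nil => exact absurd rfl h
    | cons a t => exact ⟨a, t, rfl⟩
  obtain ⟨mn, hmn⟩ : ∃ mn, PySem.List.min? (a :: t) (fun x => x) = some mn :=
    ⟨t.foldl min a, PySem.List.min?_id_cons a t⟩
  obtain ⟨mx, hmx⟩ : ∃ mx, PySem.List.max? (a :: t) (fun x => x) = some mx :=
    ⟨t.foldl max a, PySem.List.max?_id_cons a t⟩
  rw [hmn, hmx]
  simp only [Option.getD_some]
  congr 1
  apply propext
  constructor
  · rintro ⟨h1, h3⟩ d hd
    exact ⟨le_trans h1 (PySem.List.min?_isMin hmn d hd),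
           le_trans (PySem.List.max?_isMax hmx d hd) h3⟩
  · intro hall
    exact ⟨(hall mn (PySem.List.min?_mem hmn)).1, (hall mx (PySem.List.max?_mem hmx)).2⟩

-- A's scan equals the all-pairs window test over the parsed values
lemma pvChk_eq_all (vals : List Int) :
    pvChk vals
      = (if ∀ d ∈ (vals.zip vals.tail).map (fun p => p.2 - p.1), 1 ≤ d ∧ d ≤ 3 then (1 : Int) else 0) := by
  induction vals with
  | nil => simp [pvChk]
  | cons a t ih =>
    cases t with
    | nil => simp [pvChk]
    | cons b rest =>
      simp only [List.tail_cons, List.zip_cons_cons, List.map_cons, List.mem_cons, forall_eq_or_imp] at *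
      rw [pvChk]
      by_cases h : a > b ∨ a < b - 3 ∨ a = b
      · rw [if_pos h, if_neg (by push Not; intro hba; exfalso; rcases h with h | h | h <;> omega)]
      · rw [if_neg h, ih]
        have hba : 1 ≤ b - a ∧ b - a ≤ 3 := by push Not at h; omega
        by_cases hrest : ∀ d ∈ ((b :: rest).zip rest).map (fun p => p.2 - p.1), 1 ≤ d ∧ d ≤ 3
        · rw [if_pos hrest, if_pos ⟨hba, hrest⟩]
        · rw [if_neg hrest, if_neg (by rintro ⟨_, hr⟩; exact hrest hr)]

-- ===== VERDICT (by name: the statement is the Claim_ definition above) =====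
theorem safeIncrease_spec : Claim_equal_safeIncrease := by
  intro report _ _
  unfold Spec_safeIncrease safeIncrease safeIncrease_alt
  have h := loopA_eq report 0
  simp only [Nat.cast_zero, List.drop_zero] at h
  rw [h, diffs_eq]
  set vals := report.map pvParse with hvals
  have hv : report.map (fun s => (PySem.Int.ofStr? s).getD 0) = vals := rfl
  rw [hv, pvChk_eq_all]
  by_cases hnil : (vals.zip vals.tail).map (fun p => p.2 - p.1) = []
  · rw [if_pos hnil, hnil]
    simp
  · rw [if_neg hnil, minmax_eq_all _ hnil]
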